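-- pv_equiv track=rewrite | github.com/smokie777/heavenfire | python/gen_edited_luna_response.py | process_text_emojis
-- ===== SOURCE A (Python) =====
-- def contains_only_letter(s, letter):
--   for i in s:
--     if i != letter:
--       return False
--
--   return True
--
-- def is_mouth_sound(s, letter1, letter2, exceptions=[]):
--   if (
--     not s
--     or s in exceptions
--     or s == letter1 or s == letter2
--     or letter1 not in s or letter2 not in s
--   ):
--     return False
--
--   for i in range(len(s)):
--     if s[i] == letter2:
--       if contains_only_letter(s[i:], letter2):
--         return True
--       else:
--         return False
--     elif s[i] != letter1:
--       return False
--
--   return True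
--
-- def process_text_emojis(s):
--   words = s.split()
--
--   for idx, word in enumerate(words):
--     lowercase_word = word.lower()
--
--     if is_mouth_sound(lowercase_word, ':', '('):
--       words[idx] = '=('
--     elif is_mouth_sound(lowercase_word, ':', ')'):
--       words[idx] = '=)'
--     elif is_mouth_sound(lowercase_word, ':', 'p'):
--       words[idx] = '=P'
--     elif is_mouth_sound(lowercase_word, ':', 'o'):
--       words[idx] = ':0'
--
--   return ' '.join(words)
-- ===== SOURCE B (Python) =====
-- # B: per-word normalization via strip-colons + constant-suffix check and an emoji table,
-- # replacing A's is_mouth_sound/contains_only_letter index-scan helpers. (alternative, not faster)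
-- _EMOJI = {'(': '=(', ')': '=)', 'p': '=P', 'o': ':0'}
--
-- def process_text_emojis(s):
--   out = []
--   for word in s.split():
--     w = word.lower()
--     rest = w.lstrip(':')
--     e = _EMOJI.get(rest[:1])
--     if e and len(rest) < len(w) and rest == rest[0] * len(rest):
--       word = e
--     out.append(word)
--   return ' '.join(out)
-- ===== Notes on version B (the rewrite author's own statement) =====
-- stated objective: alternative
-- what changed: Replaces the is_mouth_sound/contains_only_letter index-scan helpers with a direct decomposition of each word into a stripped colon prefix plus a constant suffix, classified once through an emoji lookup table instead of four ordered scans.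
import Mathlib
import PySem

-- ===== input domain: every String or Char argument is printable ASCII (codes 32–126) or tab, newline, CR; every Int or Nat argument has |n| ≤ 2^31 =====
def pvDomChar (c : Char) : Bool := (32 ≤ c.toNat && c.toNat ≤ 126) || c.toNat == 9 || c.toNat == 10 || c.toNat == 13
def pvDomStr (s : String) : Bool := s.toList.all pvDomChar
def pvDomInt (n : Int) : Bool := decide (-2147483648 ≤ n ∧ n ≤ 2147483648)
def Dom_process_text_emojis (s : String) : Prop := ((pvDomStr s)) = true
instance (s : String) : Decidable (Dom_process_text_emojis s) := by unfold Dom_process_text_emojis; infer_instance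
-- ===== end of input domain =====

-- B replaces A's four ordered mouth-sound scans by strip-colons + constant-suffix check with an emoji table (alternative decomposition, same cost).

-- ===== PORT A =====
def contains_only_letter : List Char → Char → Bool
  | [], _ => true
  | i :: rest, letter => if i ≠ letter then false else contains_only_letter rest letter

-- the 'for i in range(len(s))' loop of is_mouth_sound, as structural recursion on the
-- current suffix (s[i] = head, s[i:] = the whole current suffix)
def ims_loop (letter1 letter2 : Char) : List Char → Bool
  | [] => true
  | c :: rest =>
    if c = letter2 then contains_only_letter (c :: rest) letter2
    else if c ≠ letter1 then false
    else ims_loop letter1 letter2 rest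

def is_mouth_sound (s : List Char) (letter1 letter2 : Char) (exceptions : List (List Char)) : Bool :=
  if s = [] ∨ s ∈ exceptions ∨ s = [letter1] ∨ s = [letter2] ∨ letter1 ∉ s ∨ letter2 ∉ s then
    false
  else
    ims_loop letter1 letter2 s

def pvAword (word : List Char) : List Char :=
  let lowercase_word := PySem.Chars.lower word
  if is_mouth_sound lowercase_word ':' '(' [] then ['=', '(']
  else if is_mouth_sound lowercase_word ':' ')' [] then ['=', ')']
  else if is_mouth_sound lowercase_word ':' 'p' [] then ['=', 'P']
  else if is_mouth_sound lowercase_word ':' 'o' [] then [':', '0']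
  else word

def process_text_emojis (s : String) : String :=
  PySem.Str.join " " ((PySem.Str.split₀ s).map (fun w => String.mk (pvAword w.toList)))

-- ===== PORT B =====
def pvEmoji : Char → Option (List Char)
  | '(' => some ['=', '(']
  | ')' => some ['=', ')']
  | 'p' => some ['=', 'P']
  | 'o' => some [':', '0']
  | _ => none

def pvFixWord (word : List Char) : List Char :=
  let w := PySem.Chars.lower word
  let rest := w.dropWhile (· == ':')   -- w.lstrip(':'): drop the leading ':' chars (exact)
  match rest with
  | [] => word                          -- rest[:1] = '' is not a table key
  | r0 :: _ =>
    match pvEmoji r0 with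
    | none => word
    | some e =>
      if rest.length < w.length ∧ rest = List.replicate rest.length r0 then e else word

def process_text_emojis_alt (s : String) : String :=
  PySem.Str.join " " ((PySem.Str.split₀ s).map (fun w => String.mk (pvFixWord w.toList)))

-- ===== PRECONDITION & SPEC =====
def Spec_process_text_emojis (s : String) (out : String) : Prop := out = process_text_emojis_alt s
instance (s : String) (out : String) : Decidable (Spec_process_text_emojis s out) := by unfold Spec_process_text_emojis; infer_instance

-- ===== CLAIM (what is proved, stated in full; the proofs are below) =====
def Claim_equal_process_text_emojis : Prop := ∀ (s : String), Dom_process_text_emojis s → Spec_process_text_emojis s (process_text_emojis s)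

-- ===== LEMMAS AND PROOFS =====

theorem contains_only_eq_all (l : List Char) (c : Char) :
    contains_only_letter l c = l.all (· == c) := by
  induction l with
  | nil => rfl
  | cons x t ih =>
      by_cases hx : x = c <;> simp [contains_only_letter, hx, ih]

theorem ims_loop_char (c : Char) (hc : c ≠ ':') (l : List Char) :
    ims_loop ':' c l =
      ((l.dropWhile (· == ':')).isEmpty || (l.dropWhile (· == ':')).all (· == c)) := by
  induction l with
  | nil => rfl
  | cons x t ih =>
      by_cases hx : x = ':'
      · subst hx
        have : (':' : Char) ≠ c := fun h => hc h.symm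
        simp [ims_loop, this, List.dropWhile_cons, ih]
      · by_cases hxc : x = c
        · subst hxc
          simp [ims_loop, contains_only_eq_all, List.dropWhile_cons, hx]
        · simp [ims_loop, hxc, hx, List.dropWhile_cons]

theorem mouth_char (c : Char) (hc : c ≠ ':') (l : List Char) :
    is_mouth_sound l ':' c [] = true ↔
      ((l.dropWhile (· == ':')) ≠ [] ∧
       (l.dropWhile (· == ':')).length < l.length ∧
       (l.dropWhile (· == ':')) = List.replicate (l.dropWhile (· == ':')).length c) := by
  set r := l.dropWhile (· == ':') with hr
  have hlen : (l.takeWhile (· == ':')).length + r.length = l.length := by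
    have h := congrArg List.length (List.takeWhile_append_dropWhile (p := (· == ':')) (l := l))
    simp only [List.length_append] at h
    rw [← hr] at h
    exact h
  have hsuff : r <:+ l := List.dropWhile_suffix _
  constructor
  · intro h
    unfold is_mouth_sound at h
    split at h
    · exact absurd h (by simp)
    · rename_i hguard
      push_neg at hguard
      obtain ⟨h0, -, h1, h2, h3, h4⟩ := hguard
      rw [ims_loop_char c hc] at h
      rw [← hr] at h
      rcases Bool.or_eq_true_iff.mp h with he | hall
      · -- r = [] would mean l is all colons, contradicting c ∈ l
        exfalso
        have hre : r = [] := by simpa using he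
        have : ∀ x ∈ l, x = ':' := by
          intro x hx
          simpa using List.dropWhile_eq_nil_iff.mp (hr.symm.trans hre) x hx
        exact hc (this c h4)
      · have hallc : ∀ x ∈ r, x = c := by
          intro x hx; simpa using List.all_eq_true.mp hall x hx
        have hrep : r = List.replicate r.length c := List.eq_replicate_length.mpr hallc
        have hne : r ≠ [] := by
          intro hre
          have : ∀ x ∈ l, x = ':' := by
            intro x hx
            simpa using List.dropWhile_eq_nil_iff.mp (hr.symm.trans hre) x hx
          exact hc (this c h4)
        refine ⟨hne, ?_, hrep⟩
        -- if nothing was dropped, l = r is all c's, contradicting ':' ∈ l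
        rcases Nat.lt_or_ge r.length l.length with hlt | hge
        · exact hlt
        · exfalso
          have htw : (l.takeWhile (· == ':')).length = 0 := by omega
          have htwe : l.takeWhile (· == ':') = [] := List.length_eq_zero_iff.mp htw
          have hlr : l = r := by
            conv_lhs => rw [← List.takeWhile_append_dropWhile (p := (· == ':')) (l := l)]
            rw [htwe]; simp [hr]
          have := hallc ':' (by rw [← hlr]; exact h3)
          exact hc this.symm
  · rintro ⟨hne, hlt, hrep⟩
    have hcr : c ∈ r := by
      rw [hrep]; exact List.mem_replicate.mpr ⟨(List.length_pos_of_ne_nil hne).ne', rfl⟩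
    have hcl : c ∈ l := hsuff.subset hcr
    have htwpos : 0 < (l.takeWhile (· == ':')).length := by omega
    have hcol : ':' ∈ l := by
      obtain ⟨x, hx⟩ := List.exists_mem_of_length_pos htwpos
      have hx' : x ∈ l.takeWhile (· == ':') := hx
      have : x = ':' := by simpa using List.mem_takeWhile_imp hx'
      exact this ▸ (List.takeWhile_prefix _).subset hx'
    have hguard : ¬ (l = [] ∨ l ∈ ([] : List (List Char)) ∨ l = [':'] ∨ l = [c] ∨ ':' ∉ l ∨ c ∉ l) := by
      push_neg
      refine ⟨?_, by simp, ?_, ?_, hcol, hcl⟩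
      · intro h; subst h; simp at hcl
      · intro h
        apply hne
        rw [hr, h]
        decide
      · intro h
        have hrc : r = [c] := by
          rw [hr, h, List.dropWhile_cons]
          simp [show (c == ':') = false by simpa using hc]
        rw [hrc, h] at hlt
        simp at hlt
    unfold is_mouth_sound
    rw [if_neg hguard, ims_loop_char c hc, ← hr]
    have : r.all (· == c) = true := by
      rw [hrep]; simp
    simp [this]

theorem mouth_false_of_head_ne (c : Char) (hc : c ≠ ':') (l : List Char) (r0 : Char) (t : List Char)
    (hr : l.dropWhile (· == ':') = r0 :: t) (hne : r0 ≠ c) :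
    is_mouth_sound l ':' c [] = false := by
  rw [Bool.eq_false_iff]
  intro h
  obtain ⟨-, -, hrep⟩ := (mouth_char c hc l).mp h
  rw [hr] at hrep
  simp only [List.length_cons, List.replicate_succ, List.cons.injEq] at hrep
  exact hne hrep.1


theorem word_eq_lpar (word l t : List Char) (hl : l = PySem.Chars.lower word)
    (hr : l.dropWhile (· == ':') = '(' :: t) : pvAword word = pvFixWord word := by
  unfold pvAword pvFixWord
  rw [← hl]
  have hf1 := mouth_false_of_head_ne ')' (by decide) l _ _ hr (by decide)
  have hf2 := mouth_false_of_head_ne 'p' (by decide) l _ _ hr (by decide)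
  have hf3 := mouth_false_of_head_ne 'o' (by decide) l _ _ hr (by decide)
  by_cases hC : (('(' :: t : List Char)).length < l.length ∧
      ('(' :: t : List Char) = List.replicate (('(' :: t : List Char)).length '('
  · have ht : is_mouth_sound l ':' '(' [] = true :=
      (mouth_char '(' (by decide) l).mpr
        ⟨by rw [hr]; simp, by rw [hr]; exact hC.1, by rw [hr]; exact hC.2⟩
    have hC2 : ('(' :: t : List Char) = List.replicate (t.length + 1) '(' := by
      simpa using hC.2
    have hC1 : t.length + 1 < l.length := by simpa using hC.1
    simp [hr, ht, hf1, hf2, hf3, List.replicate_succ, pvEmoji, hC2, hC1]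
  · have ht : is_mouth_sound l ':' '(' [] = false := by
      rw [Bool.eq_false_iff]
      intro h
      obtain ⟨-, ha, hb⟩ := (mouth_char '(' (by decide) l).mp h
      rw [hr] at ha hb
      exact hC ⟨ha, hb⟩
    simp [hr, ht, hf1, hf2, hf3, pvEmoji]
    intro h1 h2
    exact absurd ⟨by simpa using h1, by simpa using h2⟩ hC

theorem word_eq_rpar (word l t : List Char) (hl : l = PySem.Chars.lower word)
    (hr : l.dropWhile (· == ':') = ')' :: t) : pvAword word = pvFixWord word := by
  unfold pvAword pvFixWord
  rw [← hl]
  have hf1 := mouth_false_of_head_ne '(' (by decide) l _ _ hr (by decide)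
  have hf2 := mouth_false_of_head_ne 'p' (by decide) l _ _ hr (by decide)
  have hf3 := mouth_false_of_head_ne 'o' (by decide) l _ _ hr (by decide)
  by_cases hC : ((')' :: t : List Char)).length < l.length ∧
      (')' :: t : List Char) = List.replicate ((')' :: t : List Char)).length ')'
  · have ht : is_mouth_sound l ':' ')' [] = true :=
      (mouth_char ')' (by decide) l).mpr
        ⟨by rw [hr]; simp, by rw [hr]; exact hC.1, by rw [hr]; exact hC.2⟩
    have hC2 : (')' :: t : List Char) = List.replicate (t.length + 1) ')' := by
      simpa using hC.2
    have hC1 : t.length + 1 < l.length := by simpa using hC.1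
    simp [hr, ht, hf1, hf2, hf3, List.replicate_succ, pvEmoji, hC2, hC1]
  · have ht : is_mouth_sound l ':' ')' [] = false := by
      rw [Bool.eq_false_iff]
      intro h
      obtain ⟨-, ha, hb⟩ := (mouth_char ')' (by decide) l).mp h
      rw [hr] at ha hb
      exact hC ⟨ha, hb⟩
    simp [hr, ht, hf1, hf2, hf3, pvEmoji]
    intro h1 h2
    exact absurd ⟨by simpa using h1, by simpa using h2⟩ hC

theorem word_eq_pch (word l t : List Char) (hl : l = PySem.Chars.lower word)
    (hr : l.dropWhile (· == ':') = 'p' :: t) : pvAword word = pvFixWord word := by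
  unfold pvAword pvFixWord
  rw [← hl]
  have hf1 := mouth_false_of_head_ne '(' (by decide) l _ _ hr (by decide)
  have hf2 := mouth_false_of_head_ne ')' (by decide) l _ _ hr (by decide)
  have hf3 := mouth_false_of_head_ne 'o' (by decide) l _ _ hr (by decide)
  by_cases hC : (('p' :: t : List Char)).length < l.length ∧
      ('p' :: t : List Char) = List.replicate (('p' :: t : List Char)).length 'p'
  · have ht : is_mouth_sound l ':' 'p' [] = true :=
      (mouth_char 'p' (by decide) l).mpr
        ⟨by rw [hr]; simp, by rw [hr]; exact hC.1, by rw [hr]; exact hC.2⟩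
    have hC2 : ('p' :: t : List Char) = List.replicate (t.length + 1) 'p' := by
      simpa using hC.2
    have hC1 : t.length + 1 < l.length := by simpa using hC.1
    simp [hr, ht, hf1, hf2, hf3, List.replicate_succ, pvEmoji, hC2, hC1]
  · have ht : is_mouth_sound l ':' 'p' [] = false := by
      rw [Bool.eq_false_iff]
      intro h
      obtain ⟨-, ha, hb⟩ := (mouth_char 'p' (by decide) l).mp h
      rw [hr] at ha hb
      exact hC ⟨ha, hb⟩
    simp [hr, ht, hf1, hf2, hf3, pvEmoji]
    intro h1 h2
    exact absurd ⟨by simpa using h1, by simpa using h2⟩ hC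

theorem word_eq_och (word l t : List Char) (hl : l = PySem.Chars.lower word)
    (hr : l.dropWhile (· == ':') = 'o' :: t) : pvAword word = pvFixWord word := by
  unfold pvAword pvFixWord
  rw [← hl]
  have hf1 := mouth_false_of_head_ne '(' (by decide) l _ _ hr (by decide)
  have hf2 := mouth_false_of_head_ne ')' (by decide) l _ _ hr (by decide)
  have hf3 := mouth_false_of_head_ne 'p' (by decide) l _ _ hr (by decide)
  by_cases hC : (('o' :: t : List Char)).length < l.length ∧
      ('o' :: t : List Char) = List.replicate (('o' :: t : List Char)).length 'o'
  · have ht : is_mouth_sound l ':' 'o' [] = true :=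
      (mouth_char 'o' (by decide) l).mpr
        ⟨by rw [hr]; simp, by rw [hr]; exact hC.1, by rw [hr]; exact hC.2⟩
    have hC2 : ('o' :: t : List Char) = List.replicate (t.length + 1) 'o' := by
      simpa using hC.2
    have hC1 : t.length + 1 < l.length := by simpa using hC.1
    simp [hr, ht, hf1, hf2, hf3, List.replicate_succ, pvEmoji, hC2, hC1]
  · have ht : is_mouth_sound l ':' 'o' [] = false := by
      rw [Bool.eq_false_iff]
      intro h
      obtain ⟨-, ha, hb⟩ := (mouth_char 'o' (by decide) l).mp h
      rw [hr] at ha hb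
      exact hC ⟨ha, hb⟩
    simp [hr, ht, hf1, hf2, hf3, pvEmoji]
    intro h1 h2
    exact absurd ⟨by simpa using h1, by simpa using h2⟩ hC

theorem word_eq (word : List Char) : pvAword word = pvFixWord word := by
  cases hr : (PySem.Chars.lower word).dropWhile (· == ':') with
  | nil =>
      have hf : ∀ c : Char, c ≠ ':' → is_mouth_sound (PySem.Chars.lower word) ':' c [] = false := by
        intro c hc
        rw [Bool.eq_false_iff]
        intro h
        obtain ⟨hne, -, -⟩ := (mouth_char c hc (PySem.Chars.lower word)).mp h
        exact hne hr
      unfold pvAword pvFixWord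
      simp only [hr, hf '(' (by decide), hf ')' (by decide), hf 'p' (by decide),
        hf 'o' (by decide)]
      simp
  | cons r0 t =>
      by_cases h1 : r0 = '('
      · exact word_eq_lpar word _ t rfl (h1 ▸ hr)
      by_cases h2 : r0 = ')'
      · exact word_eq_rpar word _ t rfl (h2 ▸ hr)
      by_cases h3 : r0 = 'p'
      · exact word_eq_pch word _ t rfl (h3 ▸ hr)
      by_cases h4 : r0 = 'o'
      · exact word_eq_och word _ t rfl (h4 ▸ hr)
      -- head not a table key: all four A-tests false, B's lookup misses
      have hf : ∀ c : Char, c ≠ ':' → r0 ≠ c → is_mouth_sound (PySem.Chars.lower word) ':' c [] = false :=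
        fun c hc hne => mouth_false_of_head_ne c hc _ r0 t hr hne
      have he : pvEmoji r0 = none := by
        unfold pvEmoji
        split <;> first | rfl | simp_all
      unfold pvAword pvFixWord
      simp only [hr, hf '(' (by decide) h1, hf ')' (by decide) h2, hf 'p' (by decide) h3,
        hf 'o' (by decide) h4, he]
      simp

-- ===== VERDICT (by name: the statement is the Claim_ definition above) =====
theorem process_text_emojis_spec : Claim_equal_process_text_emojis := by
  intro s _
  unfold Spec_process_text_emojis process_text_emojis process_text_emojis_alt
  congr 1
  apply List.map_congr_left
  intro w _
  rw [word_eq]
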